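-- pv_equiv track=rewrite | github.com/dariorovetta/pythonVarios | unicosLista.py | unicos
-- ===== SOURCE A (Python) =====
-- def unicos(lista):
--     lista1 = []
--     for i in lista:
--         if i in lista1:
--             lista1.remove(i)
--         else:
--             lista1.append(i)
--     return lista1
-- ===== SOURCE B (Python) =====
-- def unicos(lista):
--     cnt = {}
--     last = {}
--     for i, x in enumerate(lista):
--         cnt[x] = cnt.get(x, 0) + 1
--         last[x] = i
--     out = []
--     for i, x in enumerate(lista):
--         if last[x] == i and cnt[x] % 2 == 1:
--             out.append(x)
--     return out
-- ===== Notes on version B (the rewrite author's own statement) =====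
-- stated objective: faster
-- what changed: Replaces the toggling list with linear membership tests and removals by one counting pass building count and last-index dicts plus one pass emitting each element at its last occurrence when its total count is odd.
import Mathlib
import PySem

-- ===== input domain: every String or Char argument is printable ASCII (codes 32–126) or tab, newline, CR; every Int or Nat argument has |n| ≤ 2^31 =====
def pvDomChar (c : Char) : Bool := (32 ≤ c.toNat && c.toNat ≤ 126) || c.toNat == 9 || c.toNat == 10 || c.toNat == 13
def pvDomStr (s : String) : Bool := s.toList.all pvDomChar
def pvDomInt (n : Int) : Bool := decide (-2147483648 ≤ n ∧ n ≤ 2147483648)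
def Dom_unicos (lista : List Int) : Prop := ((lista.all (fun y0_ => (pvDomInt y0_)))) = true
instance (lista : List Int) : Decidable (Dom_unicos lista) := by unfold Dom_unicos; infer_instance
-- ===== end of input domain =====

-- B replaces A's quadratic toggling list by two linear passes (count + last-index dicts); proved to return the same list.


-- ===== PORT A =====
-- 'i in lista1' is Int equality membership; 'lista1.remove(i)' (guarded by membership) erases the first occurrence.
def unicos (lista : List Int) : List Int :=
  lista.foldl (fun lista1 i => if i ∈ lista1 then lista1.erase i else lista1 ++ [i]) []

-- ===== PORT B =====
-- 'last[x]' is always present at lookup time (filled by the first loop), so getD with an unused default is exact.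
def unicos_alt (lista : List Int) : List Int :=
  let st := (PySem.List.enumerate lista).foldl
    (fun (st : PySem.Dict Int Int × PySem.Dict Int Int) ix =>
      (st.1.insert ix.2 (st.1.getD ix.2 0 + 1), st.2.insert ix.2 ix.1))
    (PySem.Dict.empty, PySem.Dict.empty)
  (PySem.List.enumerate lista).foldl
    (fun out ix =>
      if st.2.getD ix.2 (-1) = ix.1 ∧ PySem.Int.mod (st.1.getD ix.2 0) 2 = 1
      then out ++ [ix.2] else out) []

-- ===== PRECONDITION & SPEC =====
def Spec_unicos (lista : List Int) (out : List Int) : Prop := out = unicos_alt lista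
instance (lista : List Int) (out : List Int) : Decidable (Spec_unicos lista out) := by unfold Spec_unicos; infer_instance

-- ===== CLAIM (what is proved, stated in full; the proofs are below) =====
def Claim_equal_unicos : Prop := ∀ (lista : List Int), Dom_unicos lista → Spec_unicos lista (unicos lista)

-- ===== LEMMAS AND PROOFS =====

-- parity-filtered suffix scan: emits x at its last occurrence when c x is odd
def pvG (c : Int → Nat) : List Int → List Int
  | [] => []
  | x :: rest => (if x ∉ rest ∧ c x % 2 = 1 then [x] else []) ++ pvG c rest

def pvInd (acc : List Int) (x : Int) : Nat := if x ∈ acc then 1 else 0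

theorem pvG_congr (c₁ c₂ : Int → Nat) (s : List Int)
    (h : ∀ x ∈ s, c₁ x % 2 = c₂ x % 2) : pvG c₁ s = pvG c₂ s := by
  induction s with
  | nil => rfl
  | cons x rest ih =>
    simp only [pvG, h x (by simp), ih (fun y hy => h y (by simp [hy]))]

theorem pv_toggle_nodup (acc : List Int) (y : Int) (h : acc.Nodup) :
    (if y ∈ acc then acc.erase y else acc ++ [y]).Nodup := by
  split_ifs with hy
  · exact h.erase y
  · simp only [List.nodup_append]
    refine ⟨h, by simp, ?_⟩
    intro a ha e he hae
    simp only [List.mem_singleton] at he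
    subst he; subst hae
    exact hy ha

-- A's loop invariant: untouched accumulator elements in order, then touched survivors by last occurrence
theorem pv_invA (l : List Int) : ∀ (acc : List Int), acc.Nodup →
    l.foldl (fun lista1 i => if i ∈ lista1 then lista1.erase i else lista1 ++ [i]) acc
      = acc.filter (fun a => decide (l.count a = 0)) ++ pvG (fun x => l.count x + pvInd acc x) l := by
  induction l with
  | nil =>
    intro acc _
    simp [pvG]
  | cons y t ih =>
    intro acc h
    rw [List.foldl_cons]
    show List.foldl _ (if y ∈ acc then acc.erase y else acc ++ [y]) t = _
    rw [ih _ (pv_toggle_nodup acc y h)]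
    have hG : pvG (fun x => t.count x + pvInd (if y ∈ acc then acc.erase y else acc ++ [y]) x) t
        = pvG (fun x => (y :: t).count x + pvInd acc x) t := by
      apply pvG_congr
      intro x hx
      by_cases hxy : x = y
      · subst hxy
        by_cases hy : x ∈ acc
        · have hne : x ∉ acc.erase x := h.not_mem_erase
          simp only [pvInd, hy, if_true, if_neg hne, List.count_cons]
          simp
          omega
        · simp only [pvInd, hy, if_false, List.count_cons]
          simp [List.mem_append]
      · have hmem : (x ∈ (if y ∈ acc then acc.erase y else acc ++ [y])) ↔ x ∈ acc := by
          split_ifs with hy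
          · exact List.mem_erase_of_ne hxy
          · simp [hxy]
        have hyx : ¬ y = x := fun e => hxy e.symm
        simp only [pvInd, List.count_cons]
        rw [if_congr hmem rfl rfl]
        simp [hyx]
    rw [hG]
    have hF : (if y ∈ acc then acc.erase y else acc ++ [y]).filter (fun a => decide (t.count a = 0))
        = acc.filter (fun a => decide ((y :: t).count a = 0))
          ++ (if y ∉ t ∧ ((y :: t).count y + pvInd acc y) % 2 = 1 then [y] else []) := by
      by_cases hy : y ∈ acc
      · have hemit : ¬ (y ∉ t ∧ ((y :: t).count y + pvInd acc y) % 2 = 1) := by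
          rintro ⟨hyt, hpar⟩
          have : t.count y = 0 := List.count_eq_zero.mpr hyt
          simp [this, pvInd, hy] at hpar
        rw [if_neg hemit, List.append_nil, if_pos hy, h.erase_eq_filter y, List.filter_filter]
        apply List.filter_congr
        intro a _
        by_cases hay : a = y
        · subst hay; simp
        · have hya : ¬ y = a := fun e => hay e.symm
          simp [hay, hya]
      · rw [if_neg hy, List.filter_append]
        have h1 : acc.filter (fun a => decide (t.count a = 0))
            = acc.filter (fun a => decide ((y :: t).count a = 0)) := by
          apply List.filter_congr
          intro a ha
          have hya : ¬ y = a := fun e => hy (e ▸ ha)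
          simp [hya]
        have h2 : [y].filter (fun a => decide (t.count a = 0))
            = (if y ∉ t ∧ ((y :: t).count y + pvInd acc y) % 2 = 1 then [y] else []) := by
          by_cases hyt : y ∈ t
          · have : t.count y ≠ 0 := by
              simpa [List.count_eq_zero] using hyt
            simp [List.filter, this, hyt]
          · have : t.count y = 0 := List.count_eq_zero.mpr hyt
            simp [List.filter, this, hyt, pvInd, hy]
        rw [h1, h2]
    rw [hF]
    simp [pvG, List.append_assoc]

-- last-index dict facts
theorem pv_last_not_mem (suf : List Int) : ∀ (s : Int) (d : PySem.Dict Int Int) (x : Int), x ∉ suf →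
    ((PySem.List.enumerate suf s).foldl (fun d ix => d.insert ix.2 ix.1) d).get? x = d.get? x := by
  induction suf with
  | nil => intro _ _ _ _; rfl
  | cons y r ih =>
    intro s d x hx
    rw [PySem.List.enumerate_cons, List.foldl_cons]
    have hxr : x ∉ r := fun hr => hx (List.mem_cons_of_mem _ hr)
    have hxy : x ≠ y := fun e => hx (e ▸ List.mem_cons_self)
    rw [ih (s + 1) _ x hxr, PySem.Dict.get?_insert_of_ne _ _ hxy]

theorem pv_last_mem (suf : List Int) : ∀ (s : Int) (d : PySem.Dict Int Int) (x : Int), x ∈ suf →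
    ∃ j : Nat, ((PySem.List.enumerate suf s).foldl (fun d ix => d.insert ix.2 ix.1) d).get? x
        = some (s + j) ∧ suf.drop j = x :: suf.drop (j + 1) ∧ x ∉ suf.drop (j + 1) := by
  induction suf with
  | nil => intro _ _ x hx; exact absurd hx (List.not_mem_nil)
  | cons y r ih =>
    intro s d x hx
    rw [PySem.List.enumerate_cons, List.foldl_cons]
    by_cases hxr : x ∈ r
    · obtain ⟨j, hget, hdrop, hnot⟩ := ih (s + 1) (d.insert y s) x hxr
      refine ⟨j + 1, ?_, ?_, ?_⟩
      · rw [hget]; congr 1; push_cast; ring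
      · simpa using hdrop
      · simpa using hnot
    · have hxy : x = y := by
        rcases List.mem_cons.mp hx with h' | h'
        · exact h'
        · exact absurd h' hxr
      subst hxy
      refine ⟨0, ?_, by simp, by simpa using hxr⟩
      rw [pv_last_not_mem r (s + 1) _ x hxr, PySem.Dict.get?_insert_self]
      simp

-- the second loop of B equals the parity scan
theorem pv_loop2 (l : List Int)
    (cd ld : PySem.Dict Int Int)
    (hc : ∀ x, cd.getD x 0 = (l.count x : Int))
    (hl : ∀ x ∈ l, ∃ j : Nat, ld.get? x = some (j : Int) ∧ l.drop j = x :: l.drop (j + 1) ∧ x ∉ l.drop (j + 1)) :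
    ∀ (suf : List Int) (s : Nat) (acc : List Int), l.drop s = suf →
    (PySem.List.enumerate suf s).foldl
      (fun out ix => if ld.getD ix.2 (-1) = ix.1 ∧ PySem.Int.mod (cd.getD ix.2 0) 2 = 1
                     then out ++ [ix.2] else out) acc
      = acc ++ pvG (fun x => l.count x) suf := by
  intro suf
  induction suf with
  | nil => intro s acc _; simp [pvG]
  | cons x rest ih =>
    intro s acc hdrop
    have hrest : l.drop (s + 1) = rest := by
      rw [← List.tail_drop, hdrop]
      rfl
    have hxl : x ∈ l := List.mem_of_mem_drop (by rw [hdrop]; exact List.mem_cons_self)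
    obtain ⟨j, hget, hjdrop, hjnot⟩ := hl x hxl
    have hgetD : ld.getD x (-1) = (j : Int) := PySem.Dict.getD_of_get?_eq_some _ _ hget
    have hiff : (ld.getD x (-1) = (s : Int)) ↔ x ∉ rest := by
      rw [hgetD]
      constructor
      · intro he hxrest
        have hjs : j = s := by exact_mod_cast he
        subst hjs
        exact hjnot (hrest ▸ hxrest)
      · intro hxrest
        have hjs : j = s := by
          rcases Nat.lt_trichotomy j s with hlt | heq | hgt
          · exfalso
            apply hjnot
            have h1 : l.drop s = List.drop (s - (j + 1)) (l.drop (j + 1)) := by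
              rw [List.drop_drop]; congr 1; omega
            have : x ∈ l.drop s := by rw [hdrop]; exact List.mem_cons_self
            rw [h1] at this
            exact List.mem_of_mem_drop this
          · exact heq
          · exfalso
            apply hxrest
            have h1 : l.drop j = List.drop (j - (s + 1)) (l.drop (s + 1)) := by
              rw [List.drop_drop]; congr 1; omega
            have : x ∈ l.drop j := by rw [hjdrop]; exact List.mem_cons_self
            rw [h1, hrest] at this
            exact List.mem_of_mem_drop this
        rw [hjs]
    have hcnt : (PySem.Int.mod (cd.getD x 0) 2 = 1) ↔ l.count x % 2 = 1 := by
      rw [hc, PySem.Int.mod_eq_emod_of_pos (by norm_num)]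
      omega
    rw [PySem.List.enumerate_cons, List.foldl_cons]
    have hcast : ((s : Int) + 1) = ((s + 1 : Nat) : Int) := by push_cast; ring
    rw [hcast]
    show List.foldl _ (if ld.getD x (-1) = (s : Int) ∧ PySem.Int.mod (cd.getD x 0) 2 = 1
          then acc ++ [x] else acc) (PySem.List.enumerate rest ((s + 1 : Nat) : Int)) = _
    rw [if_congr (and_congr hiff hcnt) rfl rfl]
    by_cases hcond : x ∉ rest ∧ l.count x % 2 = 1
    · rw [if_pos hcond, ih (s + 1) (acc ++ [x]) hrest]
      simp [pvG, hcond]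
    · rw [if_neg hcond, ih (s + 1) acc hrest]
      simp [pvG, hcond]

theorem pv_foldl_prod {α β γ : Type} (l : List α) (f : β → α → β) (g : γ → α → γ) (b : β) (c : γ) :
    l.foldl (fun p a => (f p.1 a, g p.2 a)) (b, c) = (l.foldl f b, l.foldl g c) := by
  induction l generalizing b c with
  | nil => rfl
  | cons x xs ih => simpa using ih (f b x) (g c x)

theorem pv_cnt_enum (l : List Int) : ∀ (s : Int) (b : PySem.Dict Int Int),
    (PySem.List.enumerate l s).foldl (fun d ix => d.insert ix.2 (d.getD ix.2 0 + 1)) b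
      = l.foldl (fun d v => d.insert v (d.getD v 0 + 1)) b := by
  induction l with
  | nil => intro _ _; rfl
  | cons x xs ih =>
    intro s b
    rw [PySem.List.enumerate_cons, List.foldl_cons, List.foldl_cons, ih]

theorem pv_a_eq (l : List Int) : unicos l = pvG (fun x => l.count x) l := by
  unfold unicos
  rw [pv_invA l [] List.nodup_nil]
  simp only [List.filter_nil, List.nil_append]
  exact pvG_congr _ _ _ (by intro x _; simp [pvInd])

theorem pv_alt_eq (l : List Int) : unicos_alt l = pvG (fun x => l.count x) l := by
  have hsplit : (PySem.List.enumerate l 0).foldl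
      (fun (st : PySem.Dict Int Int × PySem.Dict Int Int) ix =>
        (st.1.insert ix.2 (st.1.getD ix.2 0 + 1), st.2.insert ix.2 ix.1))
      (PySem.Dict.empty, PySem.Dict.empty)
      = ((PySem.List.enumerate l 0).foldl
            (fun d ix => d.insert ix.2 (d.getD ix.2 0 + 1)) PySem.Dict.empty,
         (PySem.List.enumerate l 0).foldl
            (fun d ix => d.insert ix.2 ix.1) PySem.Dict.empty) :=
    pv_foldl_prod (PySem.List.enumerate l 0)
      (fun (d : PySem.Dict Int Int) (ix : Int × Int) => d.insert ix.2 (d.getD ix.2 0 + 1))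
      (fun (d : PySem.Dict Int Int) (ix : Int × Int) => d.insert ix.2 ix.1)
      PySem.Dict.empty PySem.Dict.empty
  have hc : ∀ x, ((PySem.List.enumerate l 0).foldl
      (fun d ix => d.insert ix.2 (d.getD ix.2 0 + 1)) PySem.Dict.empty).getD x 0
      = (l.count x : Int) := by
    intro x
    rw [pv_cnt_enum, PySem.Dict.getD_foldl_insert_add_one]
    simp
  have hl : ∀ x ∈ l, ∃ j : Nat, ((PySem.List.enumerate l 0).foldl
      (fun d ix => d.insert ix.2 ix.1) PySem.Dict.empty).get? x = some (j : Int)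
      ∧ l.drop j = x :: l.drop (j + 1) ∧ x ∉ l.drop (j + 1) := by
    intro x hx
    obtain ⟨j, hg, h1, h2⟩ := pv_last_mem l 0 PySem.Dict.empty x hx
    exact ⟨j, by simpa using hg, h1, h2⟩
  simp only [unicos_alt]
  rw [hsplit]
  simpa using pv_loop2 l _ _ hc hl l 0 [] rfl

-- ===== VERDICT (by name: the statement is the Claim_ definition above) =====
theorem unicos_spec : Claim_equal_unicos := by
  intro lista _
  unfold Spec_unicos
  rw [pv_a_eq, pv_alt_eq]
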